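-- pv_equiv track=rewrite | github.com/t-pranavv/local-rollouts | phyagi/rl/rewards/math_utils/math_normalize.py | _wrap_unbraced_sqrt_arguments
-- ===== SOURCE A (Python) =====
-- def _wrap_unbraced_sqrt_arguments(string: str) -> str:
--     if "\\sqrt" not in string:
--         return string
--
--     parts = string.split("\\sqrt")
--     fixed_string = parts[0]
--
--     for part in parts[1:]:
--         if part and not part.startswith("{"):
--             fixed_string += f"\\sqrt{{{part[0]}}}{part[1:]}"
--         else:
--             fixed_string += f"\\sqrt{part}"
--
--     return fixed_string
-- ===== SOURCE B (Python) =====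
-- def _wrap_unbraced_sqrt_arguments(string: str) -> str:
--     # Single left-to-right scan instead of split/rejoin.
--     out = []
--     i = 0
--     n = len(string)
--     while i < n:
--         if string.startswith("\\sqrt", i):
--             out.append("\\sqrt")
--             i += 5
--             if i < n and string[i] != "{" and not string.startswith("\\sqrt", i):
--                 out.append("{" + string[i] + "}")
--                 i += 1
--         else:
--             out.append(string[i])
--             i += 1
--     return "".join(out)
-- ===== Notes on version B (the rewrite author's own statement) =====
-- stated objective: alternative
-- what changed: Replaced the split-on-\sqrt / rejoin-with-wrapping loop by a single left-to-right scan that copies characters and, at each \sqrt occurrence, wraps the next character in braces unless the argument is already braced, another \sqrt follows immediately, or the string ends there.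
import Mathlib
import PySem

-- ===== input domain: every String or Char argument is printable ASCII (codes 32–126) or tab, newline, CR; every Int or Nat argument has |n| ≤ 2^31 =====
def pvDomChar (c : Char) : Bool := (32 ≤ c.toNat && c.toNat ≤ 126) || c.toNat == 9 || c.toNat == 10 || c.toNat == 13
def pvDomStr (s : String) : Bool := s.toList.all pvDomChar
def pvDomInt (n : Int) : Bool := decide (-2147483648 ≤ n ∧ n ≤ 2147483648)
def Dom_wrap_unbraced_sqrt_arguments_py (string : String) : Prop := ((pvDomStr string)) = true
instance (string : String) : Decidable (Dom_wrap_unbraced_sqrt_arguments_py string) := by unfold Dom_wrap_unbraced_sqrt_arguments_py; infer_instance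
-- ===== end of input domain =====

-- B replaces A's split-on-"\sqrt"/rejoin loop by a single left-to-right character scan (alternative decomposition, same cost).

-- the separator "\sqrt" as a character list (shared literal)
def pvSep : List Char := ['\\', 's', 'q', 'r', 't']

-- ===== PORT A =====
def wrap_unbraced_sqrt_arguments_py (string : String) : String :=
  if PySem.Str.isIn "\\sqrt" string = false then string
  else
    let parts := PySem.Chars.splitOn string.toList pvSep
    -- parts[0]: split always returns a non-empty list, so headD never uses its default
    let fixed0 := parts.headD []
    let fixed := (parts.drop 1).foldl (fun fx part =>
      if !part.isEmpty && !(PySem.Chars.startswith part ['{']) then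
        fx ++ pvSep ++ ['{'] ++ part.take 1 ++ ['}'] ++ part.drop 1
      else
        fx ++ pvSep ++ part) fixed0
    String.ofList fixed

-- ===== PORT B =====
def pvScan : List Char → List Char
  | [] => []
  | c :: cs =>
    if pvSep.isPrefixOf (c :: cs) then
      match h : cs.drop 4 with
      | [] => pvSep
      | d :: ds =>
        if d = '{' || pvSep.isPrefixOf (d :: ds) then
          pvSep ++ pvScan (d :: ds)
        else
          pvSep ++ '{' :: d :: '}' :: pvScan ds
    else c :: pvScan cs
termination_by l => l.length
decreasing_by
  · have := congrArg List.length h; simp at this ⊢; omega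
  · have := congrArg List.length h; simp at this ⊢; omega
  · simp

def wrap_unbraced_sqrt_arguments_py_alt (string : String) : String :=
  String.ofList (pvScan string.toList)

-- ===== PRECONDITION & SPEC =====
def Spec_wrap_unbraced_sqrt_arguments_py (string : String) (out : String) : Prop := out = wrap_unbraced_sqrt_arguments_py_alt string
instance (string : String) (out : String) : Decidable (Spec_wrap_unbraced_sqrt_arguments_py string out) := by unfold Spec_wrap_unbraced_sqrt_arguments_py; infer_instance

-- ===== CLAIM (what is proved, stated in full; the proofs are below) =====
def Claim_equal_wrap_unbraced_sqrt_arguments_py : Prop := ∀ (string : String), Dom_wrap_unbraced_sqrt_arguments_py string → Spec_wrap_unbraced_sqrt_arguments_py string (wrap_unbraced_sqrt_arguments_py string)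

-- ===== LEMMAS AND PROOFS =====

-- clean recursive model of str.split("\sqrt") on char lists
def pvSplit : List Char → List (List Char)
  | [] => [[]]
  | c :: cs =>
    if pvSep.isPrefixOf (c :: cs) then [] :: pvSplit (cs.drop 4)
    else
      match pvSplit cs with
      | [] => [[c]]
      | p :: ps => (c :: p) :: ps
termination_by l => l.length
decreasing_by
  all_goals simp

theorem pvSplit_nil : pvSplit [] = [[]] := by unfold pvSplit; rfl

theorem pvSplit_pos (c : Char) (cs : List Char) (hp : pvSep <+: (c :: cs)) :
    pvSplit (c :: cs) = [] :: pvSplit (cs.drop 4) := by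
  conv_lhs => unfold pvSplit
  simp [hp]

theorem pvSplit_neg (c : Char) (cs : List Char) (hp : ¬ pvSep <+: (c :: cs)) :
    pvSplit (c :: cs) = (match pvSplit cs with
      | [] => [[c]]
      | p :: ps => (c :: p) :: ps) := by
  conv_lhs => unfold pvSplit
  simp [hp]

theorem pvSplit_ne_nil (l : List Char) : pvSplit l ≠ [] := by
  match l with
  | [] => rw [pvSplit_nil]; simp
  | c :: cs =>
    by_cases hp : pvSep <+: (c :: cs)
    · rw [pvSplit_pos c cs hp]; simp
    · rw [pvSplit_neg c cs hp]
      rcases pvSplit cs with _ | ⟨p, ps⟩ <;> simp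

-- A's per-part step
def pvWrap (part : List Char) : List Char :=
  if !part.isEmpty && !(PySem.Chars.startswith part ['{']) then
    pvSep ++ ['{'] ++ part.take 1 ++ ['}'] ++ part.drop 1
  else
    pvSep ++ part

-- PySem's fuelled splitOn.go computes pvSplit
theorem pvSplitOn_go_eq (fuel : Nat) : ∀ (l cur : List Char) (acc : List (List Char)),
    l.length < fuel →
    PySem.Chars.splitOn.go pvSep fuel l cur acc =
      acc.reverse ++ (match pvSplit l with
        | [] => []
        | p :: ps => (cur.reverse ++ p) :: ps) := by
  induction fuel with
  | zero => intro l cur acc h; omega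
  | succ f ih =>
    intro l cur acc h
    match l with
    | [] =>
      simp [PySem.Chars.splitOn.go, pvSplit_nil]
    | c :: cs =>
      rw [PySem.Chars.splitOn.go]
      by_cases hp : pvSep.isPrefixOf (c :: cs)
      · have hpre : pvSep <+: (c :: cs) := List.isPrefixOf_iff_prefix.mp hp
        have hlen : pvSep.length ≤ (c :: cs).length := List.IsPrefix.length_le hpre
        simp only [hp, if_true]
        have hdrop : List.drop pvSep.length (c :: cs) = cs.drop 4 := by
          simp [pvSep]
        rw [hdrop, ih (cs.drop 4) [] (cur.reverse :: acc) (by simp [pvSep] at hlen; have := List.length_drop (l := cs) (i := 4); simp at h ⊢; omega)]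
        rw [pvSplit_pos c cs hpre]
        rcases hps : pvSplit (cs.drop 4) with _ | ⟨p, ps⟩
        · exact absurd hps (pvSplit_ne_nil _)
        · simp
      · simp only [hp]
        rw [ih cs (c :: cur) acc (by simp at h ⊢; omega)]
        rw [pvSplit_neg c cs (fun hpre => hp (List.isPrefixOf_iff_prefix.mpr hpre))]
        rcases hps : pvSplit cs with _ | ⟨p, ps⟩
        · exact absurd hps (pvSplit_ne_nil _)
        · simp

theorem pvSplitOn_eq (l : List Char) :
    PySem.Chars.splitOn l pvSep = pvSplit l := by
  have h := pvSplitOn_go_eq (l.length + 1) l [] [] (by omega)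
  rcases hps : pvSplit l with _ | ⟨p, ps⟩
  · exact absurd hps (pvSplit_ne_nil _)
  · rw [hps] at h
    simpa [PySem.Chars.splitOn, hps] using h

-- main invariant: the scan equals head-part ++ wrapped tail parts
theorem pvScan_eq_split (l : List Char) :
    pvScan l = (match pvSplit l with
      | [] => []
      | p :: ps => p ++ ps.flatMap pvWrap) := by
  have H : ∀ n (l : List Char), l.length ≤ n →
      pvScan l = (match pvSplit l with
        | [] => []
        | p :: ps => p ++ ps.flatMap pvWrap) := by
    intro n
    induction n with
    | zero =>
      intro l hl
      have : l = [] := by cases l <;> simp_all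
      subst this
      rw [pvSplit_nil]
      simp [pvScan]
    | succ m ih =>
      intro l hl
      match l with
      | [] =>
        rw [pvSplit_nil]
        simp [pvScan]
      | c :: cs =>
        by_cases hp : pvSep.isPrefixOf (c :: cs)
        · have hpre : pvSep <+: (c :: cs) := List.isPrefixOf_iff_prefix.mp hp
          have hlen : 5 ≤ (c :: cs).length := by
            have := List.IsPrefix.length_le hpre
            simpa [pvSep] using this
          rw [pvScan, pvSplit_pos c cs hpre]
          simp only [hp, if_true]
          rcases hrest : cs.drop 4 with _ | ⟨d, ds⟩
          · -- empty tail after the separator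
            rw [pvSplit_nil]
            simp [pvWrap]
          · have hdlen : ds.length + 1 ≤ cs.length := by
              have h4 := List.length_drop (l := cs) (i := 4)
              rw [hrest] at h4; simp at h4; omega
            by_cases hbr : (d = '{' || pvSep.isPrefixOf (d :: ds)) = true
            · simp only [hbr, if_true]
              rw [ih (d :: ds) (by simp at hl ⊢; omega)]
              rcases hps : pvSplit (d :: ds) with _ | ⟨p, ps⟩
              · exact absurd hps (pvSplit_ne_nil _)
              · have hwrap : pvWrap p = pvSep ++ p := by
                  by_cases hsp : pvSep <+: (d :: ds)
                  · rw [pvSplit_pos d ds hsp] at hps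
                    obtain ⟨hp1, _⟩ := List.cons.inj hps
                    subst hp1; simp [pvWrap]
                  · have hd : d = '{' := by
                      rcases (Bool.or_eq_true _ _).mp hbr with hd | hsp'
                      · simpa using hd
                      · exact absurd (List.isPrefixOf_iff_prefix.mp hsp') hsp
                    rw [pvSplit_neg d ds hsp] at hps
                    rcases hps2 : pvSplit ds with _ | ⟨q, qs⟩
                    · exact absurd hps2 (pvSplit_ne_nil _)
                    · rw [hps2] at hps
                      obtain ⟨hp1, _⟩ := List.cons.inj hps
                      subst hp1
                      subst hd
                      simp [pvWrap, PySem.Chars.startswith]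
                simp [List.flatMap_cons, hwrap]
            · simp only [hbr]
              rw [ih ds (by simp at hl ⊢; omega)]
              have hd : ¬ d = '{' := by
                intro h; subst h; simp at hbr
              have hsp : ¬ pvSep <+: (d :: ds) := by
                intro h; rw [List.isPrefixOf_iff_prefix.mpr h] at hbr; simp at hbr
              rw [pvSplit_neg d ds hsp]
              rcases hps2 : pvSplit ds with _ | ⟨q, qs⟩
              · exact absurd hps2 (pvSplit_ne_nil _)
              · have hwrap : pvWrap (d :: q) = pvSep ++ '{' :: d :: '}' :: q := by
                  have hsw : PySem.Chars.startswith (d :: q) ['{'] = false := by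
                    simp [PySem.Chars.startswith, List.isPrefixOf]
                    intro h; exact hd h.symm
                  simp [pvWrap, hsw]
                simp [List.flatMap_cons, hwrap]
        · have hpre : ¬ pvSep <+: (c :: cs) := fun hpre => hp (List.isPrefixOf_iff_prefix.mpr hpre)
          rw [pvScan, pvSplit_neg c cs hpre]
          simp only [hp]
          rw [ih cs (by simp at hl ⊢; omega)]
          rcases hps : pvSplit cs with _ | ⟨p, ps⟩
          · exact absurd hps (pvSplit_ne_nil _)
          · simp
  exact H l.length l le_rfl

-- when "\sqrt" does not occur, split is trivial
theorem pvSplit_of_not_infix (l : List Char) (h : ¬ pvSep <:+: l) : pvSplit l = [l] := by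
  have H : ∀ n (l : List Char), l.length ≤ n → ¬ pvSep <:+: l → pvSplit l = [l] := by
    intro n
    induction n with
    | zero =>
      intro l hl _
      have : l = [] := by cases l <;> simp_all
      subst this; exact pvSplit_nil
    | succ m ih =>
      intro l hl hinf
      match l with
      | [] => exact pvSplit_nil
      | c :: cs =>
        have hpre : ¬ pvSep <+: (c :: cs) := fun h => hinf h.isInfix
        rw [pvSplit_neg c cs hpre]
        have hcs : ¬ pvSep <:+: cs := fun h => hinf (h.trans (List.suffix_cons c cs).isInfix)
        rw [ih cs (by simp at hl ⊢; omega) hcs]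
  exact H l.length l le_rfl h

-- ===== VERDICT (by name: the statement is the Claim_ definition above) =====
theorem wrap_unbraced_sqrt_arguments_py_spec : Claim_equal_wrap_unbraced_sqrt_arguments_py := by
  intro s _
  show _ = wrap_unbraced_sqrt_arguments_py_alt s
  rw [wrap_unbraced_sqrt_arguments_py, wrap_unbraced_sqrt_arguments_py_alt]
  by_cases h : PySem.Str.isIn "\\sqrt" s = false
  · rw [if_pos h]
    have hni : ¬ pvSep <:+: s.toList := by
      intro hc
      have h2 : PySem.Chars.isIn "\\sqrt".toList s.toList = true :=
        (PySem.Chars.isIn_iff_infix _ _).mpr (by simpa [pvSep] using hc)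
      have : PySem.Str.isIn "\\sqrt" s = true := by simpa [PySem.Str.isIn] using h2
      rw [h] at this; exact Bool.false_ne_true this
    rw [pvScan_eq_split, pvSplit_of_not_infix _ hni]
    simp
  · rw [if_neg h]
    simp only
    rw [pvScan_eq_split, pvSplitOn_eq]
    rcases hps : pvSplit s.toList with _ | ⟨p, ps⟩
    · exact absurd hps (pvSplit_ne_nil _)
    · simp only [List.headD_cons, List.drop_one, List.tail_cons]
      congr 1
      have hfold : ∀ (init : List Char), ps.foldl (fun fx part =>
          if !part.isEmpty && !(PySem.Chars.startswith part ['{']) then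
            fx ++ pvSep ++ ['{'] ++ part.take 1 ++ ['}'] ++ part.tail
          else fx ++ pvSep ++ part) init = init ++ ps.flatMap pvWrap := by
        clear hps
        induction ps with
        | nil => intro init; simp
        | cons q qs ihq =>
          intro init
          rw [List.foldl_cons, List.flatMap_cons, ihq]
          by_cases hq : (!q.isEmpty && !(PySem.Chars.startswith q ['{'])) = true
          · simp [hq, pvWrap, List.drop_one]
          · simp only [Bool.not_eq_true] at hq
            simp [hq, pvWrap]
      exact hfold p
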